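-- pv_equiv track=rewrite | github.com/Matamaru/anerkennung-ai-cockpit | services/ocr.py | classify_doc
-- ===== SOURCE A (Python) =====
-- def detect_mrz_lines(all_predictions: list) -> list:
--     """Detect MRZ lines from OCR predictions.
--     :param all_predictions: List of recognized text strings.
--     :return: List of detected MRZ lines.
--     """
--     mrz_lines = []
--
--     # look for lines with at least 3 '<' characters
--     for line in all_predictions:
--         if line.count('<') >= 3:
--             mrz_lines.append(line)
--
--     return mrz_lines
--
-- PASSPORT_HINTS = {"passport", "reisepass", "passeport", "passport no", "passnummer", "staat", "nationality"}
--
-- DIPLOMA_HINTS_DE = {"zeugnis", "hochschule", "universität", "fachhochschule", "abschluss", "urkunde", "diplom"}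
--
-- DIPLOMA_HINTS_EN = {"diploma", "degree", "university", "college", "certificate", "transcript"}  # transcript only as hint
--
-- def classify_doc(predictions: list) -> str:
--     """Classify document type based on OCR text content."""
--     # MRZ detection
--     mrz_lines = detect_mrz_lines(predictions)
--     if len(mrz_lines) > 0:
--         return "passport"
--     if any(h in predictions for h in PASSPORT_HINTS):
--         return "passport"
--     if any(h in predictions for h in DIPLOMA_HINTS_DE | DIPLOMA_HINTS_EN):
--         return "diploma"
--     return "unknown"
-- ===== SOURCE B (Python) =====
-- # Single-pass rewrite: one loop over predictions maintaining three booleans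
-- # instead of a filter pass plus two separate hint-set scans.
--
-- _PASSPORT_HINTS = {"passport", "reisepass", "passeport", "passport no",
--                    "passnummer", "staat", "nationality"}
--
-- _DIPLOMA_HINTS = {"zeugnis", "hochschule", "universität", "fachhochschule",
--                   "abschluss", "urkunde", "diplom",
--                   "diploma", "degree", "university", "college",
--                   "certificate", "transcript"}
--
--
-- def classify_doc(predictions: list) -> str:
--     """Classify document type based on OCR text content."""
--     has_mrz = has_passport = has_diploma = False
--     for line in predictions:
--         has_mrz = has_mrz or line.count('<') >= 3
--         has_passport = has_passport or line in _PASSPORT_HINTS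
--         has_diploma = has_diploma or line in _DIPLOMA_HINTS
--     if has_mrz or has_passport:
--         return "passport"
--     if has_diploma:
--         return "diploma"
--     return "unknown"
-- ===== Notes on version B (the rewrite author's own statement) =====
-- stated objective: simpler
-- what changed: Inlined detect_mrz_lines and fused the MRZ filter pass and the two hint-set scans into one loop over predictions that maintains three booleans, deciding the result after the loop with the same priority.
import Mathlib
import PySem

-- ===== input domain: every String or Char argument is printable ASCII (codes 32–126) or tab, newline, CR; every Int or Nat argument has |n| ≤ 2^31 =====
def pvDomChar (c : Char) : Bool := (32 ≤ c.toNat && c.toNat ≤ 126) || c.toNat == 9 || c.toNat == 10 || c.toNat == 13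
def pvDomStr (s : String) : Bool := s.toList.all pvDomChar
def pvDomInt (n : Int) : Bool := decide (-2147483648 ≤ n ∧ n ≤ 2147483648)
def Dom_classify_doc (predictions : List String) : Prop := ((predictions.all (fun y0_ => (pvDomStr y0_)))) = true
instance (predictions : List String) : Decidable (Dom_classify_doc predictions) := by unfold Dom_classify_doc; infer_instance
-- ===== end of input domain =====

-- B fuses A's filter pass and two hint-set scans into one boolean-accumulating loop; objective: simpler.

-- ===== PORT A =====
def pvPassportHints : PySem.Set String :=
  PySem.Set.ofList ["passport", "reisepass", "passeport", "passport no", "passnummer", "staat", "nationality"]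

def pvDiplomaHintsDe : PySem.Set String :=
  PySem.Set.ofList ["zeugnis", "hochschule", "universität", "fachhochschule", "abschluss", "urkunde", "diplom"]

def pvDiplomaHintsEn : PySem.Set String :=
  PySem.Set.ofList ["diploma", "degree", "university", "college", "certificate", "transcript"]

def detect_mrz_lines (all_predictions : List String) : List String :=
  all_predictions.foldl
    (fun mrz_lines line => if PySem.Str.count line "<" ≥ 3 then mrz_lines ++ [line] else mrz_lines) []

-- 'any(h in predictions for h in S)' consumes the set S only through an order-independent any — exact per PySem.Set rules
def classify_doc (predictions : List String) : String :=
  let mrz_lines := detect_mrz_lines predictions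
  if mrz_lines.length > 0 then "passport"
  else if pvPassportHints.any (fun h => predictions.contains h) then "passport"
  else if (PySem.Set.union pvDiplomaHintsDe pvDiplomaHintsEn).any (fun h => predictions.contains h) then "diploma"
  else "unknown"

-- ===== PORT B =====
def pvPassportHintsB : PySem.Set String :=
  PySem.Set.ofList ["passport", "reisepass", "passeport", "passport no", "passnummer", "staat", "nationality"]

def pvDiplomaHintsB : PySem.Set String :=
  PySem.Set.ofList ["zeugnis", "hochschule", "universität", "fachhochschule", "abschluss", "urkunde", "diplom",
    "diploma", "degree", "university", "college", "certificate", "transcript"]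

def classify_doc_alt (predictions : List String) : String :=
  let st := predictions.foldl
    (fun (s : Bool × Bool × Bool) line =>
      (s.1 || PySem.Str.count line "<" ≥ 3,
       s.2.1 || PySem.Set.contains pvPassportHintsB line,
       s.2.2 || PySem.Set.contains pvDiplomaHintsB line))
    (false, false, false)
  if st.1 || st.2.1 then "passport"
  else if st.2.2 then "diploma"
  else "unknown"

-- ===== PRECONDITION & SPEC =====
def Spec_classify_doc (predictions : List String) (out : String) : Prop := out = classify_doc_alt predictions
instance (predictions : List String) (out : String) : Decidable (Spec_classify_doc predictions out) := by unfold Spec_classify_doc; infer_instance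

-- ===== CLAIM (what is proved, stated in full; the proofs are below) =====
def Claim_equal_classify_doc : Prop := ∀ (predictions : List String), Dom_classify_doc predictions → Spec_classify_doc predictions (classify_doc predictions)

-- ===== LEMMAS AND PROOFS =====

theorem pv_foldB (l : List String) (s : Bool × Bool × Bool) :
    l.foldl
      (fun (s : Bool × Bool × Bool) line =>
        (s.1 || PySem.Str.count line "<" ≥ 3,
         s.2.1 || PySem.Set.contains pvPassportHintsB line,
         s.2.2 || PySem.Set.contains pvDiplomaHintsB line))
      s
    = (s.1 || l.any (fun line => PySem.Str.count line "<" ≥ 3),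
       s.2.1 || l.any (fun line => PySem.Set.contains pvPassportHintsB line),
       s.2.2 || l.any (fun line => PySem.Set.contains pvDiplomaHintsB line)) := by
  induction l generalizing s with
  | nil => simp
  | cons x xs ih => rw [List.foldl_cons, ih]; simp [Bool.or_assoc]

theorem pv_mrz_filter (l : List String) (acc : List String) :
    l.foldl (fun mrz_lines line => if PySem.Str.count line "<" ≥ 3 then mrz_lines ++ [line] else mrz_lines) acc
    = acc ++ l.filter (fun line => PySem.Str.count line "<" ≥ 3) := by
  induction l generalizing acc with
  | nil => simp
  | cons x xs ih =>
    rw [List.foldl_cons, ih]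
    by_cases h : 3 ≤ PySem.Chars.count x.toList ['<'] <;> simp [h]

theorem pv_any_swap (hs preds : List String) :
    hs.any (fun h => preds.contains h) = preds.any (fun x => hs.contains x) := by
  rw [Bool.eq_iff_iff]
  simp only [List.any_eq_true, List.contains_iff_mem]
  exact ⟨fun ⟨h, hh, hp⟩ => ⟨h, hp, hh⟩, fun ⟨h, hh, hp⟩ => ⟨h, hp, hh⟩⟩

-- ===== VERDICT (by name: the statement is the Claim_ definition above) =====
theorem classify_doc_spec : Claim_equal_classify_doc := by
  intro predictions _
  unfold Spec_classify_doc classify_doc classify_doc_alt detect_mrz_lines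
  rw [pv_mrz_filter, pv_foldB, pv_any_swap pvPassportHints predictions,
      pv_any_swap (PySem.Set.union pvDiplomaHintsDe pvDiplomaHintsEn) predictions]
  have hp : pvPassportHints = pvPassportHintsB := by decide
  have hd : PySem.Set.union pvDiplomaHintsDe pvDiplomaHintsEn = pvDiplomaHintsB := by decide
  rw [hp, hd]
  by_cases hP : ∃ x ∈ predictions, 3 ≤ PySem.Chars.count x.toList ['<'] <;>
    simp [hP, List.length_pos_iff, List.filter_eq_nil_iff, PySem.Set.contains]
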